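-- pv_equiv track=rewrite | github.com/y-hiroki-radiotech/competition | third_financial_data@signate/src/rag_code/target_company_md_search.py | format_search_context
-- ===== SOURCE A (Python) =====
-- def format_search_context(search_results):
--     """
--     Format search results into a single context string
--     Args:
--         search_results (dict): Dictionary containing search results
--     Returns:
--         str: Formatted context string
--     """
--     contexts = []
--
--     # Process single keyword results
--     for keyword, matches in search_results.items():
--         # Skip combination results
--         if " AND " not in keyword:
--             for match in matches:
--                 contexts.append(match["context"])
--
--     # Process combination keyword results
--     for keyword, matches in search_results.items():
--         if " AND " in keyword:
--             for match in matches: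
--                 contexts.append(match["context"])
--
--     return "\n---\n".join(contexts)
-- ===== SOURCE B (Python) =====
-- def format_search_context(search_results):
--     # Stable sort by the boolean key " AND " in keyword: single-keyword entries
--     # (key False) come first, combination entries (key True) after, each group
--     # keeping its original (insertion) order -- exactly A's output order.
--     ordered = sorted(search_results.items(), key=lambda kv: " AND " in kv[0])
--     return "\n---\n".join(m["context"] for _, matches in ordered for m in matches)
-- ===== Notes on version B (the rewrite author's own statement) =====
-- stated objective: alternative
-- what changed: B reorders the dict items with one stable sort keyed on the boolean ' AND ' in keyword (False before True), then emits all contexts in a single flat join, instead of A's two separate filtering scans of the dict.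
import Mathlib
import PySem

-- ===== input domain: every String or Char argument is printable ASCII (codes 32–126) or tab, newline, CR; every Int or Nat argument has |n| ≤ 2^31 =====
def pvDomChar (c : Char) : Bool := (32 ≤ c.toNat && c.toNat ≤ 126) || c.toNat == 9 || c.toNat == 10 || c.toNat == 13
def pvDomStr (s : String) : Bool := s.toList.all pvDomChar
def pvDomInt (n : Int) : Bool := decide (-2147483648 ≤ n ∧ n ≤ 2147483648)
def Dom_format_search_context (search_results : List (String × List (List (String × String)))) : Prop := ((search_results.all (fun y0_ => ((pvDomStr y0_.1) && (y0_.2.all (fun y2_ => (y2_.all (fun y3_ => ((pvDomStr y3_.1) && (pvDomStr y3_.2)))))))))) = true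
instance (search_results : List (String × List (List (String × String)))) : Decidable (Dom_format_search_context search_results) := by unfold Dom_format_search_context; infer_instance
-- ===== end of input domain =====

-- B reorders the items with one stable sort on the boolean key " AND " in keyword, then joins all contexts in a single flat pass (alternative mechanism, same output).

-- shared helper: match["context"] (Pre_ guarantees the key is present, so getD "" is never the result)
def pvCtx (m : List (String × String)) : String :=
  ((PySem.Dict.ofList m).get? "context").getD ""

-- ===== PORT A =====
def format_search_context (search_results : List (String × List (List (String × String)))) : String :=
  let contexts : List String :=
    search_results.foldl (fun acc p =>
      if PySem.Str.isIn " AND " p.1 = false then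
        p.2.foldl (fun a m => a ++ [pvCtx m]) acc
      else acc) []
  let contexts : List String :=
    search_results.foldl (fun acc p =>
      if PySem.Str.isIn " AND " p.1 = true then
        p.2.foldl (fun a m => a ++ [pvCtx m]) acc
      else acc) contexts
  PySem.Str.join "\n---\n" contexts

-- ===== PORT B =====
-- key(kv) = " AND " in kv[0]  (Python bool, False < True), ported as Nat 0/1
def pvKey (p : String × List (List (String × String))) : Nat :=
  if PySem.Str.isIn " AND " p.1 then 1 else 0

def format_search_context_alt (search_results : List (String × List (List (String × String)))) : String :=
  let ordered := PySem.List.sorted search_results pvKey false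
  PySem.Str.join "\n---\n" (ordered.flatMap (fun p => p.2.map pvCtx))

-- ===== PRECONDITION & SPEC =====
-- Pre_ excludes exactly the inputs where some match dict lacks the key "context": there Python A raises KeyError.
def Pre_format_search_context (search_results : List (String × List (List (String × String)))) : Prop :=
  (search_results.all (fun p => p.2.all (fun m => m.any (fun kv => kv.1 == "context")))) = true
instance (search_results : List (String × List (List (String × String)))) : Decidable (Pre_format_search_context search_results) := by unfold Pre_format_search_context; infer_instance
def pvWitness_format_search_context : (List (String × List (List (String × String)))) :=
  [("alpha", [[("context", "c1")], [("context", "c2")]]), ("a AND b", [[("context", "c3")]])]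
def Spec_format_search_context (search_results : List (String × List (List (String × String)))) (out : String) : Prop := out = format_search_context_alt search_results
instance (search_results : List (String × List (List (String × String)))) (out : String) : Decidable (Spec_format_search_context search_results out) := by unfold Spec_format_search_context; infer_instance

-- ===== CLAIM (what is proved, stated in full; the proofs are below) =====
def Claim_equal_format_search_context : Prop := ∀ (search_results : List (String × List (List (String × String)))), Dom_format_search_context search_results → Pre_format_search_context search_results → Spec_format_search_context search_results (format_search_context search_results)

-- ===== LEMMAS AND PROOFS =====

theorem flatten_singletons {α β : Type} (f : α → β) (l : List α) :
    (List.map (fun x => [f x]) l).flatten = l.map f := by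
  induction l with
  | nil => rfl
  | cons a l ih => simp [ih]

-- A's first scan collects the contexts of the single-keyword entries …
theorem foldA1 (sr : List (String × List (List (String × String)))) (acc : List String) :
    sr.foldl (fun acc p =>
      if PySem.Str.isIn " AND " p.1 = false then
        p.2.foldl (fun a m => a ++ [pvCtx m]) acc
      else acc) acc
      = acc ++ (sr.filter (fun p => !PySem.Str.isIn " AND " p.1)).flatMap (fun p => p.2.map pvCtx) := by
  induction sr generalizing acc with
  | nil => simp
  | cons p sr ih =>
    simp only [List.foldl_cons, ih]
    by_cases h : PySem.Chars.isIn [' ', 'A', 'N', 'D', ' '] p.1.toList = true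
    · simp [h]
    · simp [eq_false_of_ne_true h, flatten_singletons]

-- … and the second scan the contexts of the combination entries.
theorem foldA2 (sr : List (String × List (List (String × String)))) (acc : List String) :
    sr.foldl (fun acc p =>
      if PySem.Str.isIn " AND " p.1 = true then
        p.2.foldl (fun a m => a ++ [pvCtx m]) acc
      else acc) acc
      = acc ++ (sr.filter (fun p => PySem.Str.isIn " AND " p.1)).flatMap (fun p => p.2.map pvCtx) := by
  induction sr generalizing acc with
  | nil => simp
  | cons p sr ih =>
    simp only [List.foldl_cons, ih]
    by_cases h : PySem.Chars.isIn [' ', 'A', 'N', 'D', ' '] p.1.toList = true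
    · simp [h, flatten_singletons]
    · simp [eq_false_of_ne_true h]

-- stable insertion of x into a (key-0 block ++ key-1 block)
theorem insert_block {α : Type} (k : α → Nat) (hk : ∀ y, k y ≤ 1) (x : α) (s c : List α)
    (hs : ∀ y ∈ s, k y = 0) (hc : ∀ y ∈ c, k y = 1) :
    PySem.List.insertBy (fun a b => decide (k a < k b)) x (s ++ c)
      = if k x = 0 then s ++ x :: c else (s ++ c) ++ [x] := by
  induction s with
  | nil =>
    induction c with
    | nil => simp [PySem.List.insertBy]
    | cons y c ihc =>
      have hy : k y = 1 := hc y (by simp)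
      by_cases hx : k x = 0
      · simp [PySem.List.insertBy, hx, hy]
      · have hx1 : k x = 1 := le_antisymm (hk x) (by omega)
        simp only [List.nil_append] at ihc ⊢
        simp [PySem.List.insertBy, hx1, hy,
          ihc (fun y hy => hc y (by simp [hy]))]
  | cons y s ihs =>
    have hy : k y = 0 := hs y (by simp)
    by_cases hx : k x = 0
    · simp [PySem.List.insertBy, hx, hy, ihs (fun z hz => hs z (by simp [hz]))]
    · simp [PySem.List.insertBy, hx, hy, ihs (fun z hz => hs z (by simp [hz]))]

-- the insertion-sort fold keeps the two blocks: it is filter(key 0) ++ filter(key 1)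
theorem fold_insert_partition {α : Type} (k : α → Nat) (hk : ∀ y, k y ≤ 1)
    (sr : List α) (s c : List α)
    (hs : ∀ y ∈ s, k y = 0) (hc : ∀ y ∈ c, k y = 1) :
    sr.foldl (fun acc x => PySem.List.insertBy (fun a b => decide (k a < k b)) x acc) (s ++ c)
      = (s ++ sr.filter (fun y => k y == 0)) ++ (c ++ sr.filter (fun y => !(k y == 0))) := by
  induction sr generalizing s c with
  | nil => simp
  | cons q sr ih =>
    simp only [List.foldl_cons, insert_block k hk q s c hs hc]
    by_cases hq : k q = 0
    · rw [if_pos hq]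
      have e : s ++ q :: c = (s ++ [q]) ++ c := by simp
      rw [e, ih (s ++ [q]) c
        (by intro y hy
            rcases List.mem_append.1 hy with h | h
            · exact hs y h
            · simp at h; subst h; exact hq) hc]
      simp [hq]
    · have hq1 : k q = 1 := le_antisymm (hk q) (by omega)
      rw [if_neg hq, List.append_assoc, ih s (c ++ [q]) hs
        (by intro y hy
            rcases List.mem_append.1 hy with h | h
            · exact hc y h
            · simp at h; subst h; exact hq1)]
      simp [hq]

theorem sorted_partition (sr : List (String × List (List (String × String)))) :
    PySem.List.sorted sr pvKey false
      = sr.filter (fun p => !PySem.Str.isIn " AND " p.1)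
        ++ sr.filter (fun p => PySem.Str.isIn " AND " p.1) := by
  have hk : ∀ y, pvKey y ≤ 1 := by
    intro y; unfold pvKey; split <;> omega
  have h := fold_insert_partition pvKey hk sr [] [] (by simp) (by simp)
  simp only [List.nil_append] at h
  rw [PySem.List.sorted_eq_foldl_insertBy, h]
  have e0 : ∀ q, (pvKey q == 0) = !PySem.Str.isIn " AND " q.1 := by
    intro q; unfold pvKey
    by_cases hq : PySem.Chars.isIn [' ', 'A', 'N', 'D', ' '] q.1.toList = true
    · simp [hq]
    · simp [eq_false_of_ne_true hq]
  congr 1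
  · exact List.filter_congr (fun q _ => e0 q)
  · refine List.filter_congr (fun q _ => ?_)
    rw [e0 q]; simp

-- ===== VERDICT (by name: the statement is the Claim_ definition above) =====
theorem format_search_context_spec : Claim_equal_format_search_context := by
  intro sr _ _
  show format_search_context sr = format_search_context_alt sr
  simp only [format_search_context, format_search_context_alt, foldA1, foldA2,
    sorted_partition, List.nil_append, List.flatMap_append]
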